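-- pv_equiv track=rewrite | github.com/zziyuni/Algorithm-Study | 프로그래머스/2/42587. 프로세스/프로세스.py | solution
-- ===== SOURCE A (Python) =====
-- from collections import deque
--
-- def solution(priorities, location):
--     answer = 0
--     order = [[idx,val]for idx,val in enumerate(priorities)]
--
--     p_queue = deque(order)
--     priorities.sort(reverse = True)
--     max_idx = 0
--
--     while p_queue:
--         idx,cur = p_queue.popleft()
--         if priorities[max_idx] > cur:
--             p_queue.append([idx,cur])
--         else:
--             answer += 1
--             if idx == location:
--                 break
--             max_idx +=1
--
--
--     return answer
-- ===== SOURCE B (Python) =====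
-- def solution(priorities, location):
--     # Group positions by priority; process priority classes in descending order,
--     # each class in circular position order starting from the current queue front.
--     groups = {}
--     for i, v in enumerate(priorities):
--         groups[v] = groups.get(v, []) + [i]
--     answer = 0
--     ptr = 0
--     for v in sorted(groups, reverse=True):
--         idxs = groups[v]
--         for i in [j for j in idxs if j >= ptr] + [j for j in idxs if j < ptr]:
--             answer += 1
--             if i == location:
--                 return answer
--             ptr = i + 1
--     return answer
-- ===== Notes on version B (the rewrite author's own statement) =====
-- stated objective: faster
-- what changed: Replaces the per-element deque rotation simulation by grouping positions by priority and visiting priority classes in descending order, printing each class in circular position order from the current queue front.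
import Mathlib
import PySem

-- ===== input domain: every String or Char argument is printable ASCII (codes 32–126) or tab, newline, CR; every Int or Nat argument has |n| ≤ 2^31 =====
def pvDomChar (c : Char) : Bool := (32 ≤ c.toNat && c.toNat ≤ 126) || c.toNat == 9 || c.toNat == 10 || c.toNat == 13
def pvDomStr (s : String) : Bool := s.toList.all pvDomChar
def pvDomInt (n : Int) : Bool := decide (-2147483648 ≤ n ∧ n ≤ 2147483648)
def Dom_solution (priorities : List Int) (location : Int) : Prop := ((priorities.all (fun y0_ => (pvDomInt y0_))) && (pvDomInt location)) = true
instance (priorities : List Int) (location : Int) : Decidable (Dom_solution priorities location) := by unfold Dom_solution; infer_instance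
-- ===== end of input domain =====

-- B changes the algorithm (grouping by priority instead of simulating the rotating queue);
-- note: Python A sorts its `priorities` argument in place (a side effect B does not have);
-- the equivalence proved here is about the return value.

-- ===== PORT A =====
-- the while loop of A; fuel only makes the recursion structural (A's loop always
-- terminates; the proof shows the chosen fuel is never exhausted).
-- `priorities[max_idx]` never goes out of range in A, so pyGetD's default 0 is dead.
def solLoop (s : List Int) (location : Int) : Nat → List (Int × Int) → Int → Int → Int
  | _, [], _, answer => answer
  | 0, _, _, answer => answer
  | fuel+1, (idx, cur) :: rest, maxIdx, answer =>
    if PySem.List.pyGetD s maxIdx 0 > cur then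
      solLoop s location fuel (rest ++ [(idx, cur)]) maxIdx answer
    else if idx = location then answer + 1
    else solLoop s location fuel rest (maxIdx + 1) (answer + 1)

def solution (priorities : List Int) (location : Int) : Int :=
  let order := PySem.List.enumerate priorities
  let s := PySem.List.sorted priorities (fun x => x) true
  solLoop s location (priorities.length * priorities.length + priorities.length + 1) order 0 0

-- ===== PORT B =====
-- groups[v] = groups.get(v, []) + [i]  over enumerate(priorities)
def altGroups (priorities : List Int) : PySem.Dict Int (List Int) :=
  (PySem.List.enumerate priorities).foldl
    (fun d p => d.modify p.2 [] (· ++ [p.1])) PySem.Dict.empty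

-- the inner `for i in ordered:` loop; inl = early return, inr = (answer, ptr) to continue
def altInner (location : Int) : List Int → Int → Int → (Int ⊕ (Int × Int))
  | [], answer, ptr => Sum.inr (answer, ptr)
  | i :: rest, answer, _ptr =>
    if i = location then Sum.inl (answer + 1)
    else altInner location rest (answer + 1) (i + 1)

-- the outer `for v in sorted(groups, reverse=True):` loop
def altOuter (location : Int) (groups : PySem.Dict Int (List Int)) : List Int → Int → Int → Int
  | [], answer, _ => answer
  | v :: vs, answer, ptr =>
    let idxs := groups.getD v []
    match altInner location (idxs.filter (fun j => ptr ≤ j) ++ idxs.filter (fun j => j < ptr)) answer ptr with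
    | Sum.inl a => a
    | Sum.inr (a, p) => altOuter location groups vs a p

def solution_alt (priorities : List Int) (location : Int) : Int :=
  let groups := altGroups priorities
  altOuter location groups (PySem.List.sorted groups.keys (fun x => x) true) 0 0

-- ===== PRECONDITION & SPEC =====
def Spec_solution (priorities : List Int) (location : Int) (out : Int) : Prop := out = solution_alt priorities location
instance (priorities : List Int) (location : Int) (out : Int) : Decidable (Spec_solution priorities location out) := by unfold Spec_solution; infer_instance

-- ===== CLAIM (what is proved, stated in full; the proofs are below) =====
def Claim_equal_solution : Prop := ∀ (priorities : List Int) (location : Int), Dom_solution priorities location → Spec_solution priorities location (solution priorities location)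

-- ===== LEMMAS AND PROOFS =====

-- maximum of the second components (0 for the empty list, which is never used)
def vmax : List (Int × Int) → Int
  | [] => 0
  | [x] => x.2
  | x :: y :: t => max x.2 (vmax (y :: t))

-- the macro model: repeatedly print the first element holding the maximal value,
-- the queue continuing cyclically right after it
def printSeqF : Nat → List (Int × Int) → List Int
  | 0, _ => []
  | fuel+1, q =>
    let k := q.findIdx (fun x => x.2 == vmax q)
    match q[k]? with
    | none => []
    | some x => x.1 :: printSeqF fuel (q.drop (k+1) ++ q.take k)

def printSeq (q : List (Int × Int)) : List Int := printSeqF q.length q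

-- 1-based rank of the first occurrence of L (length of the list if absent)
def rank (L : Int) : List Int → Int
  | [] => 0
  | i :: t => if i = L then 1 else 1 + rank L t

-- remaining elements in queue order: positions ≥ ptr first, then positions < ptr
def rot (t : Int) (R : List (Int × Int)) : List (Int × Int) :=
  R.filter (fun x => t ≤ x.1) ++ R.filter (fun x => x.1 < t)

theorem vmax_cons (x : Int × Int) (t : List (Int × Int)) (h : t ≠ []) :
    vmax (x :: t) = max x.2 (vmax t) := by
  cases t with
  | nil => exact absurd rfl h
  | cons y t => rfl

theorem le_vmax (q : List (Int × Int)) (x : Int × Int) (hx : x ∈ q) : x.2 ≤ vmax q := by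
  induction q with
  | nil => simp at hx
  | cons y t ih =>
    cases t with
    | nil => simp at hx; simp [hx, vmax]
    | cons z t' =>
      rw [vmax_cons y (z :: t') (by simp)]
      rcases List.mem_cons.mp hx with h | h
      · simp [h]
      · exact le_max_of_le_right (ih h)

theorem vmax_le (q : List (Int × Int)) (M : Int) (hq : q ≠ []) (h : ∀ x ∈ q, x.2 ≤ M) :
    vmax q ≤ M := by
  induction q with
  | nil => exact absurd rfl hq
  | cons y t ih =>
    cases t with
    | nil => simpa [vmax] using h y (by simp)
    | cons z t' =>
      rw [vmax_cons y (z :: t') (by simp)]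
      exact max_le (h y (by simp)) (ih (by simp) (fun x hx => h x (by simp [hx])))

theorem findIdx_first {α} (p : α → Bool) (y : α) (v : List α) :
    ∀ u : List α, (∀ x ∈ u, p x = false) → p y = true →
      (u ++ y :: v).findIdx p = u.length := by
  intro u
  induction u with
  | nil => intro _ hy; simp [List.findIdx_cons, hy]
  | cons x u' ih =>
    intro hu hy
    have hx : p x = false := hu x (by simp)
    simp [List.findIdx_cons, hx, ih (fun z hz => hu z (by simp [hz])) hy]

theorem printSeq_step (u v : List (Int × Int)) (i M : Int)
    (hu : ∀ x ∈ u, x.2 < M) (hv : ∀ x ∈ v, x.2 ≤ M) :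
    printSeq (u ++ (i, M) :: v) = i :: printSeq (v ++ u) := by
  have hMmem : (i, M) ∈ u ++ (i, M) :: v := by simp
  have hub : ∀ x ∈ u ++ (i, M) :: v, x.2 ≤ M := by
    intro x hx
    rcases List.mem_append.mp hx with h | h
    · exact le_of_lt (hu x h)
    · rcases List.mem_cons.mp h with h | h
      · simp [h]
      · exact hv x h
  have hM : vmax (u ++ (i, M) :: v) = M :=
    le_antisymm (vmax_le _ M (by simp) hub) (le_vmax _ _ hMmem)
  have hk : (u ++ (i, M) :: v).findIdx (fun x => x.2 == vmax (u ++ (i, M) :: v)) = u.length := by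
    rw [hM]
    exact findIdx_first _ _ _ u
      (fun x hx => by simpa using ne_of_lt (hu x hx)) (by simp)
  have hget : (u ++ (i, M) :: v)[u.length]? = some (i, M) := by
    rw [List.getElem?_append_right (le_refl u.length)]
    simp
  have hdrop : (u ++ (i, M) :: v).drop (u.length + 1) = v := by
    have h1 : u ++ (i, M) :: v = (u ++ [(i, M)]) ++ v := by simp
    have h2 : (u ++ [(i, M)]).length = u.length + 1 := by simp
    rw [h1, ← h2, List.drop_left]
  have htake : (u ++ (i, M) :: v).take u.length = u := List.take_left
  have hlen : (u ++ (i, M) :: v).length = (v.length + u.length) + 1 := by simp; omega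
  rw [printSeq, hlen]
  show printSeqF ((v.length + u.length) + 1) (u ++ (i, M) :: v) = _
  rw [printSeqF]
  simp only [hk, hget, hdrop, htake]
  rw [printSeq]
  simp [Nat.add_comm]

theorem solLoop_rot (s : List Int) (L m a : Int) :
    ∀ (u rest : List (Int × Int)) (fuel : Nat),
      (∀ x ∈ u, PySem.List.pyGetD s m 0 > x.2) →
      solLoop s L (fuel + u.length) (u ++ rest) m a = solLoop s L fuel (rest ++ u) m a := by
  intro u
  induction u with
  | nil => intro rest fuel _; simp
  | cons y u' ih =>
    intro rest fuel hu
    obtain ⟨y1, y2⟩ := y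
    have hlen : fuel + ((y1, y2) :: u').length = (fuel + u'.length) + 1 := by simp; omega
    rw [hlen]
    show solLoop s L ((fuel + u'.length) + 1) ((y1, y2) :: (u' ++ rest)) m a = _
    rw [solLoop]
    have hgt : PySem.List.pyGetD s m 0 > y2 := hu (y1, y2) (by simp)
    simp only [if_pos hgt]
    have : (u' ++ rest) ++ [(y1, y2)] = u' ++ (rest ++ [(y1, y2)]) := by simp
    rw [this, ih (rest ++ [(y1, y2)]) fuel (fun x hx => hu x (by simp [hx]))]
    simp

theorem first_split (M : Int) :
    ∀ (l : List (Int × Int)), (∃ x ∈ l, x.2 = M) →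
      ∃ u i v, l = u ++ (i, M) :: v ∧ ∀ y ∈ u, y.2 ≠ M := by
  intro l
  induction l with
  | nil => rintro ⟨x, hx, _⟩; simp at hx
  | cons x t ih =>
    intro h
    by_cases hx : x.2 = M
    · exact ⟨[], x.1, t, by simp [← hx], by simp⟩
    · obtain ⟨y, hy, hyM⟩ := h
      rcases List.mem_cons.mp hy with h1 | h1
      · exact absurd (h1 ▸ hyM) hx
      · obtain ⟨u, i, v, heq, hu⟩ := ih ⟨y, h1, hyM⟩
        exact ⟨x :: u, i, v, by simp [heq], by
          intro z hz
          rcases List.mem_cons.mp hz with h2 | h2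
          · exact h2 ▸ hx
          · exact hu z h2⟩

theorem solLoop_eq (s : List Int) (L : Int) :
    ∀ (n : Nat) (q : List (Int × Int)) (m : Nat) (a : Int) (fuel : Nat),
      q.length ≤ n →
      s.Pairwise (· ≥ ·) →
      (q.map Prod.snd).Perm (s.drop m) →
      q.length * q.length + q.length ≤ fuel →
      solLoop s L fuel q (m : Int) a = a + rank L (printSeq q) := by
  intro n
  induction n with
  | zero =>
    intro q m a fuel hn _ _ _
    have hq : q = [] := List.length_eq_zero_iff.mp (Nat.le_zero.mp hn)
    subst hq
    cases fuel <;> simp [solLoop, printSeq, printSeqF, rank]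
  | succ n ih =>
    intro q m a fuel hn hs hperm hfuel
    rcases List.eq_nil_or_concat q with hq | _
    · subst hq
      cases fuel <;> simp [solLoop, printSeq, printSeqF, rank]
    case inr hqne =>
      have hqne' : q ≠ [] := by rcases hqne with ⟨_, _, h⟩; simp [h]
      have hdne : s.drop m ≠ [] := by
        intro h
        rw [h] at hperm
        exact hqne' (by simpa using List.Perm.eq_nil hperm)
      have hm : m < s.length := by
        by_contra h
        exact hdne (List.drop_eq_nil_iff.mpr (by omega))
      have hdropeq : s.drop m = s[m] :: s.drop (m + 1) := List.drop_eq_getElem_cons hm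
      have hget : PySem.List.pyGetD s (m : Int) 0 = s[m] := by
        rw [PySem.List.pyGetD_natCast]
        exact List.getD_eq_getElem s 0 hm
      have hub : ∀ x ∈ q, x.2 ≤ s[m] := by
        intro x hx
        have hmem : x.2 ∈ s.drop m := hperm.mem_iff.mp (List.mem_map_of_mem hx)
        rw [hdropeq] at hmem
        rcases List.mem_cons.mp hmem with h | h
        · exact le_of_eq h
        · have hpd : (s.drop m).Pairwise (· ≥ ·) := hs.sublist (List.drop_sublist m s)
          rw [hdropeq] at hpd
          exact (List.pairwise_cons.mp hpd).1 _ h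
      have hMmem : ∃ x ∈ q, x.2 = s[m] := by
        have hh : s[m] ∈ s.drop m := by
          rw [hdropeq]
          exact List.mem_cons_self
        have : s[m] ∈ q.map Prod.snd := hperm.symm.mem_iff.mp hh
        obtain ⟨x, hx, hx2⟩ := List.mem_map.mp this
        exact ⟨x, hx, hx2⟩
      obtain ⟨u, i, v, hqeq, hune⟩ := first_split s[m] q hMmem
      have hu' : ∀ y ∈ u, y.2 < s[m] :=
        fun y hy => lt_of_le_of_ne (hub y (by simp [hqeq, hy])) (hune y hy)
      have hv' : ∀ y ∈ v, y.2 ≤ s[m] := fun y hy => hub y (by simp [hqeq, hy])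
      have hlen : q.length = u.length + v.length + 1 := by simp [hqeq]; omega
      have hlenle : q.length ≤ fuel :=
        le_trans (Nat.le_add_left q.length (q.length * q.length)) hfuel
      obtain ⟨fuel2, hfe⟩ : ∃ f2, fuel = (f2 + 1) + u.length :=
        ⟨fuel - 1 - u.length, by omega⟩
      have hrot := solLoop_rot s L (m : Int) a u ((i, s[m]) :: v) (fuel2 + 1)
        (fun x hx => by rw [hget]; exact hu' x hx)
      rw [hqeq, hfe, hrot]
      show solLoop s L (fuel2 + 1) ((i, s[m]) :: (v ++ u)) (m : Int) a = _
      rw [solLoop]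
      have hnotgt : ¬ (PySem.List.pyGetD s (m : Int) 0 > s[m]) := by rw [hget]; exact lt_irrefl _
      rw [if_neg hnotgt]
      have hps : printSeq (u ++ (i, s[m]) :: v) = i :: printSeq (v ++ u) :=
        printSeq_step u v i s[m] hu' hv'
      rw [hps]
      by_cases hiL : i = L
      · rw [if_pos hiL, rank, if_pos hiL]
      · rw [if_neg hiL, rank, if_neg hiL]
        have hcast : ((m : Int) + 1) = ((m + 1 : Nat) : Int) := by push_cast; ring
        rw [hcast]
        have hperm2 : ((v ++ u).map Prod.snd).Perm (s.drop (m + 1)) := by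
          have h1 : q.map Prod.snd = u.map Prod.snd ++ s[m] :: v.map Prod.snd := by
            simp [hqeq]
          have h2 : (u.map Prod.snd ++ s[m] :: v.map Prod.snd).Perm
              (s[m] :: (u.map Prod.snd ++ v.map Prod.snd)) := List.perm_middle
          have h3 : (s[m] :: (u.map Prod.snd ++ v.map Prod.snd)).Perm
              (s[m] :: s.drop (m + 1)) := h2.symm.trans (h1 ▸ hperm) |>.trans (by rw [hdropeq])
          have h4 := h3.cons_inv
          have h5 : (v ++ u).map Prod.snd = v.map Prod.snd ++ u.map Prod.snd := by simp
          rw [h5]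
          exact List.perm_append_comm.trans h4
        have hlen2 : (v ++ u).length ≤ n := by simp [List.length_append]; omega
        have hfuel2 : (v ++ u).length * (v ++ u).length + (v ++ u).length ≤ fuel2 := by
          have hk : (v ++ u).length = u.length + v.length := by
            simp [List.length_append]; omega
          set k := u.length + v.length with hkdef
          have he : (k + 1) * (k + 1) + (k + 1) = k * k + 3 * k + 2 := by ring
          rw [hk]
          rw [hlen] at hfuel
          have hfuel' : (u.length + v.length + 1) * (u.length + v.length + 1)
              + (u.length + v.length + 1) ≤ fuel := hfuel
          have hfuel'' : k * k + 3 * k + 2 ≤ fuel := by rw [← he]; exact hfuel'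
          generalize k * k = K at *
          omega
        rw [ih (v ++ u) (m + 1) (a + 1) fuel2 hlen2 hs hperm2 hfuel2]
        ring

-- positions are strictly increasing: a two-sided filter split at threshold t
theorem filter_split (p : Int × Int → Bool) (t : Int) :
    ∀ (R : List (Int × Int)), R.Pairwise (fun x y => x.1 < y.1) →
      R.filter (fun x => p x && decide (x.1 < t)) ++ R.filter (fun x => p x && decide (t ≤ x.1))
        = R.filter p := by
  intro R
  induction R with
  | nil => intro _; simp
  | cons x R' ih =>
    intro hA
    have hlt : ∀ y ∈ R', x.1 < y.1 := (List.pairwise_cons.mp hA).1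
    have ih' := ih (List.pairwise_cons.mp hA).2
    by_cases hx : p x
    · by_cases ht : x.1 < t
      · simp only [List.filter_cons, hx, decide_eq_true ht, Bool.and_self, Bool.true_and,
          decide_eq_true_eq]
        have : ¬ t ≤ x.1 := by omega
        simp only [this, if_true, if_false]
        simpa using ih'
      · have hge : t ≤ x.1 := by omega
        have h1 : R'.filter (fun y => p y && decide (y.1 < t)) = [] := by
          apply List.filter_eq_nil_iff.mpr
          intro y hy
          have : ¬ y.1 < t := by have := hlt y hy; omega
          simp [this]
        have h2 : R'.filter (fun y => p y && decide (t ≤ y.1)) = R'.filter p := by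
          apply List.filter_congr
          intro y hy
          have : t ≤ y.1 := by have := hlt y hy; omega
          simp [this]
        simp only [List.filter_cons, hx, decide_eq_true hge, Bool.true_and]
        have : ¬ x.1 < t := ht
        simp only [this, decide_false, if_true, h1, h2]
        simp
    · have hx' : p x = false := by simpa using hx
      simp only [List.filter_cons, hx', Bool.false_and]
      exact ih'

-- positions are unique: the filter at one position is the singleton
theorem filter_pos_eq (h' v : Int) :
    ∀ (R : List (Int × Int)), R.Pairwise (fun x y => x.1 < y.1) → (h', v) ∈ R →
      R.filter (fun x => decide (x.1 = h')) = [(h', v)] := by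
  intro R
  induction R with
  | nil => intro _ h; simp at h
  | cons x R' ih =>
    intro hA hmem
    have hlt : ∀ y ∈ R', x.1 < y.1 := (List.pairwise_cons.mp hA).1
    rcases List.mem_cons.mp hmem with h1 | h1
    · subst h1
      have h0 : R'.filter (fun y => decide (y.1 = h')) = [] := by
        apply List.filter_eq_nil_iff.mpr
        intro y hy
        have := hlt y hy
        simp only [decide_eq_true_eq]
        omega
      simp [List.filter_cons, h0]
    · have hxne : x.1 ≠ h' := by have := hlt _ h1; omega
      simp only [List.filter_cons, decide_eq_false hxne, if_false]
      exact ih (List.pairwise_cons.mp hA).2 h1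

-- compose two filters into one
theorem filter2 (R : List (Int × Int)) (p q r : Int × Int → Bool)
    (h : ∀ x ∈ R, (q x && p x) = r x) : (R.filter p).filter q = R.filter r := by
  rw [List.filter_filter]
  exact List.filter_congr (fun x hx => h x hx)

-- removing one element of the maximal class from the front of the circular queue
theorem pop_class (v h' ptr : Int) (c' : List Int) (R : List (Int × Int))
    (hA : R.Pairwise (fun x y => x.1 < y.1))
    (hV : ∀ x ∈ R, x.2 ≤ v)
    (hC : (R.filter (fun x => decide (x.2 = v) && decide (ptr ≤ x.1))).map Prod.fst
        ++ (R.filter (fun x => decide (x.2 = v) && decide (x.1 < ptr))).map Prod.fst = h' :: c') :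
    printSeq (rot ptr R) = h' :: printSeq (rot (h' + 1) (R.filter (fun x => !decide (x.1 = h'))))
    ∧ c' = ((R.filter (fun x => !decide (x.1 = h'))).filter
              (fun x => decide (x.2 = v) && decide (h' + 1 ≤ x.1))).map Prod.fst
        ++ ((R.filter (fun x => !decide (x.1 = h'))).filter
              (fun x => decide (x.2 = v) && decide (x.1 < h' + 1))).map Prod.fst
    ∧ (R.filter (fun x => !decide (x.1 = h'))).filter (fun x => !decide (x.2 = v))
        = R.filter (fun x => !decide (x.2 = v)) := by
  cases hF1 : R.filter (fun x => decide (x.2 = v) && decide (ptr ≤ x.1)) with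
  | cons y t₁ =>
    -- Case A: a class member at or after ptr exists; h' is the first one
    rw [hF1] at hC
    simp only [List.map_cons, List.cons_append, List.cons.injEq] at hC
    obtain ⟨hy1, hc'⟩ := hC
    have hymem : y ∈ R.filter (fun x => decide (x.2 = v) && decide (ptr ≤ x.1)) := by
      rw [hF1]; exact List.mem_cons_self
    have hyR : y ∈ R := List.mem_of_mem_filter hymem
    have hyp := List.of_mem_filter hymem
    simp only [Bool.and_eq_true, decide_eq_true_eq] at hyp
    have hy2 : y.2 = v := hyp.1
    have hptr : ptr ≤ h' := by have h2 := hyp.2; omega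
    have hyeq : y = (h', v) := by
      have : y = (y.1, y.2) := rfl
      rw [this, hy1, hy2]
    have hmem : (h', v) ∈ R := hyeq ▸ hyR
    have hpw : (y :: t₁).Pairwise (fun x z => x.1 < z.1) := by
      rw [← hF1]; exact hA.filter _
    have ht₁gt : ∀ z ∈ t₁, h' < z.1 := by
      intro z hz
      have := (List.pairwise_cons.mp hpw).1 z hz
      omega
    have hfirst : ∀ x ∈ R, x.2 = v → ptr ≤ x.1 → h' ≤ x.1 := by
      intro x hx hxv hxge
      have hxm : x ∈ y :: t₁ := by
        rw [← hF1]; exact List.mem_filter.mpr ⟨hx, by simp [hxv, hxge]⟩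
      rcases List.mem_cons.mp hxm with h1 | h1
      · rw [h1, hy1]
      · exact le_of_lt (ht₁gt x h1)
    have hposv : ∀ x ∈ R, x.1 = h' → x.2 = v := by
      intro x hx hxh
      have hsing := filter_pos_eq h' v R hA hmem
      have : x ∈ R.filter (fun z => decide (z.1 = h')) :=
        List.mem_filter.mpr ⟨hx, by simp [hxh]⟩
      rw [hsing] at this
      simp at this
      rw [this]
    -- decomposition of the ≥ ptr part
    have step1 : R.filter (fun x => decide (ptr ≤ x.1))
        = R.filter (fun x => decide (ptr ≤ x.1) && decide (x.1 < h'))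
          ++ (h', v) :: R.filter (fun x => decide (h' + 1 ≤ x.1)) := by
      rw [← filter_split (fun x => decide (ptr ≤ x.1)) h' R hA]
      congr 1
      have e1 : R.filter (fun x => decide (ptr ≤ x.1) && decide (h' ≤ x.1))
          = R.filter (fun x => decide (h' ≤ x.1)) := by
        apply List.filter_congr
        intro x hx
        simp only [← Bool.decide_and]
        exact decide_eq_decide.mpr (by omega)
      rw [e1, ← filter_split (fun x => decide (h' ≤ x.1)) (h' + 1) R hA]
      have e2 : R.filter (fun x => decide (h' ≤ x.1) && decide (x.1 < h' + 1))
          = [(h', v)] := by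
        rw [← filter_pos_eq h' v R hA hmem]
        apply List.filter_congr
        intro x hx
        simp only [← Bool.decide_and]
        exact decide_eq_decide.mpr (by omega)
      have e3 : R.filter (fun x => decide (h' ≤ x.1) && decide (h' + 1 ≤ x.1))
          = R.filter (fun x => decide (h' + 1 ≤ x.1)) := by
        apply List.filter_congr
        intro x hx
        simp only [← Bool.decide_and]
        exact decide_eq_decide.mpr (by omega)
      rw [e2, e3]
      simp
    have hu : ∀ x ∈ R.filter (fun x => decide (ptr ≤ x.1) && decide (x.1 < h')), x.2 < v := by
      intro x hx
      have hxR := List.mem_of_mem_filter hx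
      have hxp := List.of_mem_filter hx
      simp only [Bool.and_eq_true, decide_eq_true_eq] at hxp
      rcases lt_or_eq_of_le (hV x hxR) with h1 | h1
      · exact h1
      · exact absurd (hfirst x hxR h1 hxp.1) (by omega)
    have hw : ∀ x ∈ R.filter (fun x => decide (h' + 1 ≤ x.1))
        ++ R.filter (fun x => decide (x.1 < ptr)), x.2 ≤ v := by
      intro x hx
      rcases List.mem_append.mp hx with h1 | h1 <;> exact hV x (List.mem_of_mem_filter h1)
    have hstep := printSeq_step
      (R.filter (fun x => decide (ptr ≤ x.1) && decide (x.1 < h')))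
      (R.filter (fun x => decide (h' + 1 ≤ x.1)) ++ R.filter (fun x => decide (x.1 < ptr)))
      h' v hu hw
    have habs1 : (R.filter (fun x => !decide (x.1 = h'))).filter (fun x => decide (h' + 1 ≤ x.1))
        = R.filter (fun x => decide (h' + 1 ≤ x.1)) := by
      apply filter2
      intro x hx
      simp only [← decide_not, ← Bool.decide_and]
      exact decide_eq_decide.mpr (by omega)
    have habs2 : (R.filter (fun x => !decide (x.1 = h'))).filter (fun x => decide (x.1 < h' + 1))
        = R.filter (fun x => decide (x.1 < h')) := by
      apply filter2
      intro x hx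
      simp only [← decide_not, ← Bool.decide_and]
      exact decide_eq_decide.mpr (by omega)
    have e4 : R.filter (fun x => decide (x.1 < h'))
        = R.filter (fun x => decide (x.1 < ptr))
          ++ R.filter (fun x => decide (ptr ≤ x.1) && decide (x.1 < h')) := by
      rw [← filter_split (fun x => decide (x.1 < h')) ptr R hA]
      congr 1
      · apply List.filter_congr
        intro x hx
        simp only [← Bool.decide_and]
        exact decide_eq_decide.mpr (by omega)
      · apply List.filter_congr
        intro x hx
        simp only [← Bool.decide_and]
        exact decide_eq_decide.mpr (by omega)
    refine ⟨?_, ?_, ?_⟩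
    · -- printSeq equation
      show printSeq (R.filter (fun x => decide (ptr ≤ x.1)) ++ R.filter (fun x => decide (x.1 < ptr))) = _
      rw [step1]
      have hassoc : (R.filter (fun x => decide (ptr ≤ x.1) && decide (x.1 < h'))
          ++ (h', v) :: R.filter (fun x => decide (h' + 1 ≤ x.1)))
          ++ R.filter (fun x => decide (x.1 < ptr))
          = R.filter (fun x => decide (ptr ≤ x.1) && decide (x.1 < h'))
            ++ (h', v) :: (R.filter (fun x => decide (h' + 1 ≤ x.1))
              ++ R.filter (fun x => decide (x.1 < ptr))) := by simp
      rw [hassoc, hstep]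
      show _ = h' :: printSeq (rot (h' + 1) _)
      congr 1
      unfold rot
      rw [habs1, habs2, e4]
      simp
    · -- c' characterisation
      have g1 : (R.filter (fun x => !decide (x.1 = h'))).filter
          (fun x => decide (x.2 = v) && decide (h' + 1 ≤ x.1)) = t₁ := by
        have ga : (R.filter (fun x => !decide (x.1 = h'))).filter
            (fun x => decide (x.2 = v) && decide (h' + 1 ≤ x.1))
            = R.filter (fun x => decide (x.2 = v) && decide (h' + 1 ≤ x.1)) := by
          apply filter2
          intro x hx
          simp only [← decide_not, ← Bool.decide_and]
          exact decide_eq_decide.mpr (by omega)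
        have gb : (R.filter (fun x => decide (x.2 = v) && decide (ptr ≤ x.1))).filter
            (fun x => decide (h' + 1 ≤ x.1))
            = R.filter (fun x => decide (x.2 = v) && decide (h' + 1 ≤ x.1)) := by
          apply filter2
          intro x hx
          simp only [← Bool.decide_and]
          exact decide_eq_decide.mpr (by omega)
        rw [ga, ← gb, hF1]
        have hy1f : (decide (h' + 1 ≤ y.1)) = false := by
          rw [hy1]; simp
        simp only [List.filter_cons, hy1f]
        apply List.filter_eq_self.mpr
        intro z hz
        have := ht₁gt z hz
        simp
        omega
      have g2 : (R.filter (fun x => !decide (x.1 = h'))).filter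
          (fun x => decide (x.2 = v) && decide (x.1 < h' + 1))
          = R.filter (fun x => decide (x.2 = v) && decide (x.1 < ptr)) := by
        apply filter2
        intro x hx
        simp only [← decide_not, ← Bool.decide_and]
        apply decide_eq_decide.mpr
        constructor
        · rintro ⟨⟨hxv, hxlt⟩, hxne⟩
          refine ⟨hxv, ?_⟩
          by_contra hge
          have := hfirst x hx hxv (by omega)
          omega
        · rintro ⟨hxv, hxlt⟩
          have := hfirst x hx hxv
          omega
      rw [← hc', g1, g2]
    · -- untouched classes
      apply filter2
      intro x hx
      simp only [← decide_not, ← Bool.decide_and]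
      apply decide_eq_decide.mpr
      constructor
      · rintro ⟨h1, _⟩; exact h1
      · intro h1
        refine ⟨h1, fun h2 => h1 (hposv x hx h2)⟩
  | nil =>
    -- Case B: every class member is before ptr
    rw [hF1] at hC
    simp only [List.map_nil, List.nil_append] at hC
    cases hF2 : R.filter (fun x => decide (x.2 = v) && decide (x.1 < ptr)) with
    | nil => rw [hF2] at hC; simp at hC
    | cons y t₂ =>
      rw [hF2] at hC
      simp only [List.map_cons, List.cons.injEq] at hC
      obtain ⟨hy1, hc'⟩ := hC
      have hymem : y ∈ R.filter (fun x => decide (x.2 = v) && decide (x.1 < ptr)) := by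
        rw [hF2]; exact List.mem_cons_self
      have hyR : y ∈ R := List.mem_of_mem_filter hymem
      have hyp := List.of_mem_filter hymem
      simp only [Bool.and_eq_true, decide_eq_true_eq] at hyp
      have hy2 : y.2 = v := hyp.1
      have hlt : h' < ptr := by have := hyp.2; omega
      have hyeq : y = (h', v) := by
        have : y = (y.1, y.2) := rfl
        rw [this, hy1, hy2]
      have hmem : (h', v) ∈ R := hyeq ▸ hyR
      have hpw : (y :: t₂).Pairwise (fun x z => x.1 < z.1) := by
        rw [← hF2]; exact hA.filter _
      have ht₂gt : ∀ z ∈ t₂, h' < z.1 := by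
        intro z hz
        have := (List.pairwise_cons.mp hpw).1 z hz
        omega
      have hnoge : ∀ x ∈ R, x.2 = v → ¬ ptr ≤ x.1 := by
        intro x hx hxv hge
        have : x ∈ R.filter (fun z => decide (z.2 = v) && decide (ptr ≤ z.1)) :=
          List.mem_filter.mpr ⟨hx, by simp [hxv, hge]⟩
        rw [hF1] at this
        simp at this
      have hvge : ∀ x ∈ R, x.2 = v → h' ≤ x.1 := by
        intro x hx hxv
        have hxlt : x.1 < ptr := by
          by_contra hge
          exact hnoge x hx hxv (by omega)
        have hxm : x ∈ y :: t₂ := by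
          rw [← hF2]; exact List.mem_filter.mpr ⟨hx, by simp [hxv, hxlt]⟩
        rcases List.mem_cons.mp hxm with h1 | h1
        · rw [h1, hy1]
        · exact le_of_lt (ht₂gt x h1)
      have hposv : ∀ x ∈ R, x.1 = h' → x.2 = v := by
        intro x hx hxh
        have hsing := filter_pos_eq h' v R hA hmem
        have : x ∈ R.filter (fun z => decide (z.1 = h')) :=
          List.mem_filter.mpr ⟨hx, by simp [hxh]⟩
        rw [hsing] at this
        simp at this
        rw [this]
      have step1 : R.filter (fun x => decide (x.1 < ptr))
          = R.filter (fun x => decide (x.1 < h'))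
            ++ (h', v) :: R.filter (fun x => decide (h' + 1 ≤ x.1) && decide (x.1 < ptr)) := by
        rw [← filter_split (fun x => decide (x.1 < ptr)) h' R hA]
        congr 1
        · apply List.filter_congr
          intro x hx
          simp only [← Bool.decide_and]
          exact decide_eq_decide.mpr (by omega)
        · rw [← filter_split (fun x => decide (x.1 < ptr) && decide (h' ≤ x.1)) (h' + 1) R hA]
          have e2 : R.filter (fun x => (decide (x.1 < ptr) && decide (h' ≤ x.1)) && decide (x.1 < h' + 1))
              = [(h', v)] := by
            rw [← filter_pos_eq h' v R hA hmem]
            apply List.filter_congr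
            intro x hx
            simp only [← Bool.decide_and]
            exact decide_eq_decide.mpr (by omega)
          have e3 : R.filter (fun x => (decide (x.1 < ptr) && decide (h' ≤ x.1)) && decide (h' + 1 ≤ x.1))
              = R.filter (fun x => decide (h' + 1 ≤ x.1) && decide (x.1 < ptr)) := by
            apply List.filter_congr
            intro x hx
            simp only [← Bool.decide_and]
            exact decide_eq_decide.mpr (by omega)
          rw [e2, e3]
          simp
      have hu : ∀ x ∈ R.filter (fun x => decide (ptr ≤ x.1))
          ++ R.filter (fun x => decide (x.1 < h')), x.2 < v := by
        intro x hx
        rcases List.mem_append.mp hx with h1 | h1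
        · have hxR := List.mem_of_mem_filter h1
          have hxp := List.of_mem_filter h1
          simp only [decide_eq_true_eq] at hxp
          rcases lt_or_eq_of_le (hV x hxR) with h2 | h2
          · exact h2
          · exact absurd hxp (hnoge x hxR h2)
        · have hxR := List.mem_of_mem_filter h1
          have hxp := List.of_mem_filter h1
          simp only [decide_eq_true_eq] at hxp
          rcases lt_or_eq_of_le (hV x hxR) with h2 | h2
          · exact h2
          · exact absurd (hvge x hxR h2) (by omega)
      have hw : ∀ x ∈ R.filter (fun x => decide (h' + 1 ≤ x.1) && decide (x.1 < ptr)), x.2 ≤ v :=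
        fun x hx => hV x (List.mem_of_mem_filter hx)
      have hstep := printSeq_step
        (R.filter (fun x => decide (ptr ≤ x.1)) ++ R.filter (fun x => decide (x.1 < h')))
        (R.filter (fun x => decide (h' + 1 ≤ x.1) && decide (x.1 < ptr)))
        h' v hu hw
      have habs1 : (R.filter (fun x => !decide (x.1 = h'))).filter (fun x => decide (h' + 1 ≤ x.1))
          = R.filter (fun x => decide (h' + 1 ≤ x.1)) := by
        apply filter2
        intro x hx
        simp only [← decide_not, ← Bool.decide_and]
        exact decide_eq_decide.mpr (by omega)
      have habs2 : (R.filter (fun x => !decide (x.1 = h'))).filter (fun x => decide (x.1 < h' + 1))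
          = R.filter (fun x => decide (x.1 < h')) := by
        apply filter2
        intro x hx
        simp only [← decide_not, ← Bool.decide_and]
        exact decide_eq_decide.mpr (by omega)
      have e4 : R.filter (fun x => decide (h' + 1 ≤ x.1))
          = R.filter (fun x => decide (h' + 1 ≤ x.1) && decide (x.1 < ptr))
            ++ R.filter (fun x => decide (ptr ≤ x.1)) := by
        rw [← filter_split (fun x => decide (h' + 1 ≤ x.1)) ptr R hA]
        congr 1
        apply List.filter_congr
        intro x hx
        simp only [← Bool.decide_and]
        exact decide_eq_decide.mpr (by omega)
      refine ⟨?_, ?_, ?_⟩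
      · show printSeq (R.filter (fun x => decide (ptr ≤ x.1)) ++ R.filter (fun x => decide (x.1 < ptr))) = _
        rw [step1]
        have hassoc : R.filter (fun x => decide (ptr ≤ x.1))
            ++ (R.filter (fun x => decide (x.1 < h'))
              ++ (h', v) :: R.filter (fun x => decide (h' + 1 ≤ x.1) && decide (x.1 < ptr)))
            = (R.filter (fun x => decide (ptr ≤ x.1)) ++ R.filter (fun x => decide (x.1 < h')))
              ++ (h', v) :: R.filter (fun x => decide (h' + 1 ≤ x.1) && decide (x.1 < ptr)) := by simp
        rw [hassoc, hstep]
        congr 1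
        unfold rot
        rw [habs1, habs2, e4]
        simp
      · have g1 : (R.filter (fun x => !decide (x.1 = h'))).filter
            (fun x => decide (x.2 = v) && decide (h' + 1 ≤ x.1)) = t₂ := by
          have ga : (R.filter (fun x => !decide (x.1 = h'))).filter
              (fun x => decide (x.2 = v) && decide (h' + 1 ≤ x.1))
              = R.filter (fun x => decide (x.2 = v) && decide (h' + 1 ≤ x.1)) := by
            apply filter2
            intro x hx
            simp only [← decide_not, ← Bool.decide_and]
            exact decide_eq_decide.mpr (by omega)
          have gb : (R.filter (fun x => decide (x.2 = v) && decide (x.1 < ptr))).filter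
              (fun x => decide (h' + 1 ≤ x.1))
              = R.filter (fun x => decide (x.2 = v) && decide (h' + 1 ≤ x.1)) := by
            apply filter2
            intro x hx
            simp only [← Bool.decide_and]
            apply decide_eq_decide.mpr
            constructor
            · rintro ⟨hge, hxv, _⟩; exact ⟨hxv, hge⟩
            · rintro ⟨hxv, hge⟩
              have := hnoge x hx hxv
              exact ⟨hge, hxv, by omega⟩
          rw [ga, ← gb, hF2]
          have hy1f : (decide (h' + 1 ≤ y.1)) = false := by
            rw [hy1]; simp
          simp only [List.filter_cons, hy1f]
          apply List.filter_eq_self.mpr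
          intro z hz
          have := ht₂gt z hz
          simp
          omega
        have g2 : (R.filter (fun x => !decide (x.1 = h'))).filter
            (fun x => decide (x.2 = v) && decide (x.1 < h' + 1)) = [] := by
          rw [List.filter_filter]
          apply List.filter_eq_nil_iff.mpr
          intro x hx
          simp only [← decide_not, ← Bool.decide_and, decide_eq_true_eq]
          rintro ⟨⟨hxv, hxlt⟩, hxne⟩
          have := hvge x hx hxv
          omega
        rw [← hc', g1, g2]
        simp
      · apply filter2
        intro x hx
        simp only [← decide_not, ← Bool.decide_and]
        apply decide_eq_decide.mpr
        constructor
        · rintro ⟨h1, _⟩; exact h1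
        · intro h1
          refine ⟨h1, fun h2 => h1 (hposv x hx h2)⟩

theorem altInner_eq (L v : Int) :
    ∀ (c : List Int) (R : List (Int × Int)) (answer ptr : Int),
      R.Pairwise (fun x y => x.1 < y.1) →
      (∀ x ∈ R, x.2 ≤ v) →
      c = (R.filter (fun x => decide (x.2 = v) && decide (ptr ≤ x.1))).map Prod.fst
          ++ (R.filter (fun x => decide (x.2 = v) && decide (x.1 < ptr))).map Prod.fst →
      (∀ a, altInner L c answer ptr = Sum.inl a →
          a = answer + rank L (printSeq (rot ptr R)))
      ∧ (∀ a p, altInner L c answer ptr = Sum.inr (a, p) →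
          a = answer + (c.length : Int) ∧
          rank L (printSeq (rot ptr R))
            = (c.length : Int) + rank L (printSeq (rot p (R.filter (fun x => !decide (x.2 = v)))))) := by
  intro c
  induction c with
  | nil =>
    intro R answer ptr hA hV hC
    have h0 := hC.symm
    obtain ⟨hm1, hm2⟩ := List.append_eq_nil_iff.mp h0
    have hf1 : R.filter (fun x => decide (x.2 = v) && decide (ptr ≤ x.1)) = [] :=
      List.map_eq_nil_iff.mp hm1
    have hf2 : R.filter (fun x => decide (x.2 = v) && decide (x.1 < ptr)) = [] :=
      List.map_eq_nil_iff.mp hm2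
    have hnone : ∀ x ∈ R, x.2 ≠ v := by
      intro x hx hxv
      rcases le_or_gt ptr x.1 with hge | hlt
      · have : x ∈ R.filter (fun z => decide (z.2 = v) && decide (ptr ≤ z.1)) :=
          List.mem_filter.mpr ⟨hx, by simp [hxv, hge]⟩
        rw [hf1] at this; simp at this
      · have : x ∈ R.filter (fun z => decide (z.2 = v) && decide (z.1 < ptr)) :=
          List.mem_filter.mpr ⟨hx, by simp [hxv, hlt]⟩
        rw [hf2] at this; simp at this
    have hfeq : R.filter (fun x => !decide (x.2 = v)) = R :=
      List.filter_eq_self.mpr (fun x hx => by simp [hnone x hx])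
    constructor
    · intro a h; simp [altInner] at h
    · intro a p h
      simp only [altInner, Sum.inr.injEq, Prod.mk.injEq] at h
      obtain ⟨ha, hp⟩ := h
      refine ⟨by simp [← ha], ?_⟩
      rw [← hp, hfeq]
      simp
  | cons h' c' ih =>
    intro R answer ptr hA hV hC
    obtain ⟨hps, hc2, hcl⟩ := pop_class v h' ptr c' R hA hV hC.symm
    by_cases hL : h' = L
    · constructor
      · intro a h
        simp only [altInner, if_pos hL] at h
        injection h with h
        rw [← h, hps, rank, if_pos hL]
      · intro a p h
        simp only [altInner, if_pos hL] at h
        exact absurd h (by simp)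
    · have hA2 : (R.filter (fun x => !decide (x.1 = h'))).Pairwise (fun x y => x.1 < y.1) :=
        hA.filter _
      have hV2 : ∀ x ∈ R.filter (fun x => !decide (x.1 = h')), x.2 ≤ v :=
        fun x hx => hV x (List.mem_of_mem_filter hx)
      obtain ⟨ih1, ih2⟩ := ih (R.filter (fun x => !decide (x.1 = h'))) (answer + 1) (h' + 1)
        hA2 hV2 hc2
      constructor
      · intro a h
        simp only [altInner, if_neg hL] at h
        have := ih1 a h
        rw [hps, rank, if_neg hL]
        omega
      · intro a p h
        simp only [altInner, if_neg hL] at h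
        obtain ⟨ha, hrk⟩ := ih2 a p h
        rw [hcl] at hrk
        rw [hps, rank, if_neg hL]
        constructor
        · simp only [List.length_cons]
          push_cast
          omega
        · simp only [List.length_cons]
          push_cast
          omega

theorem altOuter_eq (L : Int) (groups : PySem.Dict Int (List Int)) :
    ∀ (vs : List Int) (R : List (Int × Int)) (answer ptr : Int),
      R.Pairwise (fun x y => x.1 < y.1) →
      (∀ x ∈ R, x.2 ∈ vs) →
      vs.Pairwise (· > ·) →
      (∀ w ∈ vs, groups.getD w [] = (R.filter (fun x => decide (x.2 = w))).map Prod.fst) →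
      altOuter L groups vs answer ptr = answer + rank L (printSeq (rot ptr R)) := by
  intro vs
  induction vs with
  | nil =>
    intro R answer ptr _ h2 _ _
    have hR : R = [] := by
      cases R with
      | nil => rfl
      | cons x t => exact absurd (h2 x (by simp)) (by simp)
    subst hR
    simp [altOuter, rot, printSeq, printSeqF, rank]
  | cons v vs' ih =>
    intro R answer ptr hA h2 h3 h4
    have hVmax : ∀ x ∈ R, x.2 ≤ v := by
      intro x hx
      rcases List.mem_cons.mp (h2 x hx) with h | h
      · exact le_of_eq h
      · exact le_of_lt ((List.pairwise_cons.mp h3).1 _ h)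
    have hidxs := h4 v (by simp)
    have hord1 : (groups.getD v []).filter (fun j => decide (ptr ≤ j))
        = (R.filter (fun x => decide (x.2 = v) && decide (ptr ≤ x.1))).map Prod.fst := by
      rw [hidxs, List.filter_map]
      congr 1
      apply filter2
      intro x hx
      exact Bool.and_comm _ _
    have hord2 : (groups.getD v []).filter (fun j => decide (j < ptr))
        = (R.filter (fun x => decide (x.2 = v) && decide (x.1 < ptr))).map Prod.fst := by
      rw [hidxs, List.filter_map]
      congr 1
      apply filter2
      intro x hx
      exact Bool.and_comm _ _
    obtain ⟨inl1, inr1⟩ := altInner_eq L v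
      ((R.filter (fun x => decide (x.2 = v) && decide (ptr ≤ x.1))).map Prod.fst
        ++ (R.filter (fun x => decide (x.2 = v) && decide (x.1 < ptr))).map Prod.fst)
      R answer ptr hA hVmax rfl
    simp only [altOuter]
    rw [hord1, hord2]
    cases hres : altInner L
      ((R.filter (fun x => decide (x.2 = v) && decide (ptr ≤ x.1))).map Prod.fst
        ++ (R.filter (fun x => decide (x.2 = v) && decide (x.1 < ptr))).map Prod.fst)
      answer ptr with
    | inl a => exact inl1 a hres
    | inr ap =>
      obtain ⟨a, p⟩ := ap
      obtain ⟨ha, hrk⟩ := inr1 a p hres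
      show altOuter L groups vs' a p = _
      have hA' : (R.filter (fun x => !decide (x.2 = v))).Pairwise (fun x y => x.1 < y.1) :=
        hA.filter _
      have h2' : ∀ x ∈ R.filter (fun x => !decide (x.2 = v)), x.2 ∈ vs' := by
        intro x hx
        have hxR := List.mem_of_mem_filter hx
        have hxp := List.of_mem_filter hx
        simp only [Bool.not_eq_eq_eq_not, Bool.not_true, decide_eq_false_iff_not] at hxp
        rcases List.mem_cons.mp (h2 x hxR) with h | h
        · exact absurd h hxp
        · exact h
      have h3' : vs'.Pairwise (· > ·) := (List.pairwise_cons.mp h3).2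
      have h4' : ∀ w ∈ vs', groups.getD w []
          = ((R.filter (fun x => !decide (x.2 = v))).filter
              (fun x => decide (x.2 = w))).map Prod.fst := by
        intro w hw
        have hwv : v > w := (List.pairwise_cons.mp h3).1 w hw
        rw [h4 w (by simp [hw])]
        congr 1
        symm
        apply filter2
        intro x hx
        simp only [← decide_not, ← Bool.decide_and]
        exact decide_eq_decide.mpr (by omega)
      rw [ih (R.filter (fun x => !decide (x.2 = v))) a p hA' h2' h3' h4']
      rw [hrk]
      omega

theorem altGroups_getD (priorities : List Int) (w : Int) :
    (altGroups priorities).getD w []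
      = ((PySem.List.enumerate priorities).filter (fun x => decide (x.2 = w))).map Prod.fst := by
  have h1 : altGroups priorities
      = ((PySem.List.enumerate priorities).map Prod.swap).foldl
          (fun d p => d.modify p.1 [] (· ++ [p.2])) PySem.Dict.empty := by
    rw [List.foldl_map]
    rfl
  rw [h1, PySem.Dict.getD_foldl_modify_append]
  rw [List.filter_map, List.map_map]
  have e1 : (PySem.List.enumerate priorities).filter ((fun p => p.1 == w) ∘ Prod.swap)
      = (PySem.List.enumerate priorities).filter (fun x => decide (x.2 = w)) := by
    apply List.filter_congr
    intro x hx
    show (x.2 == w) = decide (x.2 = w)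
    by_cases h : x.2 = w <;> simp [h]
  rw [e1]
  have e2 : ((PySem.List.enumerate priorities).filter (fun x => decide (x.2 = w))).map
      ((fun x => x.2) ∘ Prod.swap)
      = ((PySem.List.enumerate priorities).filter (fun x => decide (x.2 = w))).map Prod.fst :=
    List.map_congr_left (fun a _ => rfl)
  rw [e2]
  simp [PySem.Dict.getD_empty]

theorem altGroups_keys (priorities : List Int) :
    (altGroups priorities).keys = PySem.Set.ofList priorities := by
  unfold altGroups
  rw [PySem.Dict.keys_foldl_modify_key]
  rw [PySem.List.map_snd_enumerate]
  simp [PySem.Dict.keys_empty, PySem.Set.update_nil_left]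

theorem rot_zero_enumerate (priorities : List Int) :
    rot 0 (PySem.List.enumerate priorities) = PySem.List.enumerate priorities := by
  unfold rot
  have h1 : (PySem.List.enumerate priorities).filter (fun x => decide ((0 : Int) ≤ x.1))
      = PySem.List.enumerate priorities := by
    apply List.filter_eq_self.mpr
    intro x hx
    obtain ⟨k, hk, hxe⟩ := (PySem.List.mem_enumerate_iff _ _ _).mp hx
    simp [hxe]
  have h2 : (PySem.List.enumerate priorities).filter (fun x => decide (x.1 < (0 : Int))) = [] := by
    apply List.filter_eq_nil_iff.mpr
    intro x hx
    obtain ⟨k, hk, hxe⟩ := (PySem.List.mem_enumerate_iff _ _ _).mp hx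
    simp [hxe]
  rw [h1, h2]
  simp

-- ===== VERDICT (by name: the statement is the Claim_ definition above) =====
theorem solution_spec : Claim_equal_solution := by
  unfold Claim_equal_solution
  intro priorities location _
  unfold Spec_solution
  -- A's simulation computes rank in the macro print order
  have hA : solution priorities location
      = 0 + rank location (printSeq (PySem.List.enumerate priorities)) := by
    unfold solution
    have hs : (PySem.List.sorted priorities (fun x => x) true).Pairwise (· ≥ ·) :=
      (PySem.List.sorted_pairwise_rev priorities (fun x => x)).imp (fun h => h)
    have hperm : ((PySem.List.enumerate priorities).map Prod.snd).Perm
        ((PySem.List.sorted priorities (fun x => x) true).drop 0) := by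
      rw [List.drop_zero]
      have h1 : (PySem.List.enumerate priorities).map Prod.snd = priorities := by
        simpa using PySem.List.map_snd_enumerate priorities 0
      rw [h1]
      exact (PySem.List.sorted_perm priorities (fun x => x) true).symm
    have hlen : (PySem.List.enumerate priorities).length = priorities.length := by
      simp [PySem.List.length_enumerate]
    have := solLoop_eq (PySem.List.sorted priorities (fun x => x) true) location
      (PySem.List.enumerate priorities).length (PySem.List.enumerate priorities)
      0 0 (priorities.length * priorities.length + priorities.length + 1)
      (le_refl _) hs hperm (by rw [hlen]; omega)
    simpa using this
  -- B's grouped scan computes the same rank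
  have hB : solution_alt priorities location
      = 0 + rank location (printSeq (rot 0 (PySem.List.enumerate priorities))) := by
    unfold solution_alt
    apply altOuter_eq
    · exact PySem.List.pairwise_lt_enumerate priorities 0
    · intro x hx
      apply (PySem.List.mem_sorted _ _ _ _).mpr
      rw [altGroups_keys]
      apply (PySem.Set.mem_ofList _ _).mpr
      have h1 : x.2 ∈ (PySem.List.enumerate priorities).map Prod.snd :=
        List.mem_map_of_mem hx
      rwa [show (PySem.List.enumerate priorities).map Prod.snd = priorities by
        simpa using PySem.List.map_snd_enumerate priorities 0] at h1
    · have hnd : (PySem.List.sorted (altGroups priorities).keys (fun x => x) true).Nodup := by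
        apply (PySem.List.sorted_perm _ _ _).nodup_iff.mpr
        rw [altGroups_keys]
        exact PySem.Set.nodup_ofList priorities
      have hle := PySem.List.sorted_pairwise_rev (altGroups priorities).keys (fun x => x)
      exact (hnd.and hle).imp (fun ⟨hne, h⟩ => lt_of_le_of_ne h (Ne.symm hne))
    · intro w _
      exact altGroups_getD priorities w
  rw [hA, hB, rot_zero_enumerate]
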